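-- pv_equiv track=rewrite | github.com/bemnet16/competitive-programming | leetcode/maximum-score-after-splitting-a-string.py | maxScore
-- ===== SOURCE A (Python) =====
-- def maxScore(s: str) -> int:
--     length = len(s)
--     prefix_0 = [0] * length
--     prefix_1 = [0] * length
--     answer = 0
--
--     sum_0 = 0
--     sum_1 = 0
--
--     for i in range(length):
--         if s[i] == '0':
--             sum_0 += 1
--         else:
--             sum_1 += 1
--
--         prefix_0[i] += sum_0
--         prefix_1[i] += sum_1
--
--     for i in range(1,length):
--         score = (prefix_1[-1] - prefix_1[i - 1]) + (prefix_0[i - 1])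
--         answer = max(score, answer)
--
--     return answer
-- ===== SOURCE B (Python) =====
-- def maxScore(s: str) -> int:
--     ones_total = 0
--     for c in s:
--         if c != '0':
--             ones_total += 1
--     zeros = 0
--     ones = 0
--     best = 0
--     for c in s[:-1]:
--         if c == '0':
--             zeros += 1
--         else:
--             ones += 1
--         score = zeros + (ones_total - ones)
--         if score > best:
--             best = score
--     return best
-- ===== Notes on version B (the rewrite author's own statement) =====
-- stated objective: simpler
-- what changed: Replaces the two prefix-count arrays and the index-based split loop with two plain counting passes: total ones first, then one forward pass over s[:-1] maintaining zeros/ones counters and a running maximum.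
import Mathlib
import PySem

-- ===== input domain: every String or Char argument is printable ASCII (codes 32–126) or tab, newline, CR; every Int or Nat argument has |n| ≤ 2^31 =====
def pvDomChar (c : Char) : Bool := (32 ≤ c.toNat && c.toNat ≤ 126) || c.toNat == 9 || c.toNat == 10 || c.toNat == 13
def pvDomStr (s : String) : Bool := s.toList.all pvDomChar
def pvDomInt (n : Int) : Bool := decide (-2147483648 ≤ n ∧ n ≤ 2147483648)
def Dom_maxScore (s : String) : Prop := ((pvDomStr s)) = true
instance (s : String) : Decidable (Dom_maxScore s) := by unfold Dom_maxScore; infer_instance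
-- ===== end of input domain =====

-- B replaces A's two prefix-count arrays and index-based split loop by two plain counting passes (simpler decomposition, no arrays).


-- ===== PORT A =====
-- body of A's first loop: classify s[i], then prefix_0[i] += sum_0; prefix_1[i] += sum_1
def stepA (st : List Int × List Int × Int × Int) (ic : Int × Char) :
    List Int × List Int × Int × Int :=
  let s0 := if ic.2 = '0' then st.2.2.1 + 1 else st.2.2.1
  let s1 := if ic.2 = '0' then st.2.2.2 else st.2.2.2 + 1
  (PySem.List.pySetD st.1 ic.1 (PySem.List.pyGetD st.1 ic.1 0 + s0),
   PySem.List.pySetD st.2.1 ic.1 (PySem.List.pyGetD st.2.1 ic.1 0 + s1),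
   s0, s1)

-- literal port of A: build prefix_0/prefix_1 (preallocated [0]*length, updated in place), then scan range(1, length)
def maxScore (s : String) : Int :=
  let cs := s.toList
  let length := cs.length
  let st := (PySem.List.enumerate cs 0).foldl stepA
    (List.replicate length 0, List.replicate length 0, 0, 0)
  (PySem.List.pyRange 1 (length : Int) 1).foldl
    (fun answer i =>
      max ((PySem.List.pyGetD st.2.1 (-1) 0 - PySem.List.pyGetD st.2.1 (i - 1) 0)
        + PySem.List.pyGetD st.1 (i - 1) 0) answer) 0

-- ===== PORT B =====
-- body of B's second loop: update zeros/ones with c, then keep the best score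
def stepB (T : Int) (st : Int × Int × Int) (c : Char) : Int × Int × Int :=
  let zeros := if c = '0' then st.1 + 1 else st.1
  let ones := if c = '0' then st.2.1 else st.2.1 + 1
  let score := zeros + (T - ones)
  (zeros, ones, if score > st.2.2 then score else st.2.2)

-- port of B: total ones in one pass, then one pass over s[:-1] with zeros/ones counters and a running max
def maxScore_alt (s : String) : Int :=
  let cs := s.toList
  let onesTotal : Int := cs.foldl (fun acc c => if c ≠ '0' then acc + 1 else acc) 0
  ((PySem.List.slice cs none (some (-1))).foldl (stepB onesTotal) (0, 0, 0)).2.2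

-- ===== PRECONDITION & SPEC =====
def Spec_maxScore (s : String) (out : Int) : Prop := out = maxScore_alt s
instance (s : String) (out : Int) : Decidable (Spec_maxScore s out) := by unfold Spec_maxScore; infer_instance

-- ===== CLAIM (what is proved, stated in full; the proofs are below) =====
def Claim_equal_maxScore : Prop := ∀ (s : String), Dom_maxScore s → Spec_maxScore s (maxScore s)

-- ===== LEMMAS AND PROOFS =====

-- number of '0' characters / of non-'0' characters, as Int
def zCnt (l : List Char) : Int := (l.countP (· = '0') : Int)
def oCnt (l : List Char) : Int := (l.countP (· ≠ '0') : Int)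

theorem zCnt_nil : zCnt [] = 0 := rfl
theorem oCnt_nil : oCnt [] = 0 := rfl
theorem zCnt_cons (c : Char) (l : List Char) :
    zCnt (c :: l) = (if c = '0' then 1 else 0) + zCnt l := by
  by_cases h : c = '0' <;> simp [zCnt, List.countP_cons, h] <;> push_cast <;> ring
theorem oCnt_cons (c : Char) (l : List Char) :
    oCnt (c :: l) = (if c = '0' then 0 else 1) + oCnt l := by
  by_cases h : c = '0' <;> simp [oCnt, List.countP_cons, h] <;> push_cast <;> ring

-- A's first loop: the prefix arrays hold the running zero/one counts of each prefix
theorem loopA1 (l : List Char) (k : Nat) (pre0 pre1 : List Int) (s0 s1 : Int)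
    (h0 : pre0.length = k) (h1 : pre1.length = k) :
    (PySem.List.enumerate l (k : Int)).foldl stepA
      (pre0 ++ List.replicate l.length 0, pre1 ++ List.replicate l.length 0, s0, s1)
    = (pre0 ++ (List.range l.length).map (fun j => s0 + zCnt (l.take (j+1))),
       pre1 ++ (List.range l.length).map (fun j => s1 + oCnt (l.take (j+1))),
       s0 + zCnt l, s1 + oCnt l) := by
  induction l generalizing k pre0 pre1 s0 s1 with
  | nil => simp [PySem.List.enumerate_nil, zCnt_nil, oCnt_nil]
  | cons c l ih =>
      rw [PySem.List.enumerate_cons]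
      simp only [List.foldl_cons]
      have hget : ∀ (pre : List Int), pre.length = k →
          PySem.List.pyGetD (pre ++ List.replicate (c :: l).length 0) (k : Int) 0 = 0 := by
        intro pre hp
        rw [PySem.List.pyGetD_natCast]
        simp [List.getD, List.getElem?_append_right, hp]
      have hset : ∀ (pre : List Int) (v : Int), pre.length = k →
          PySem.List.pySetD (pre ++ List.replicate (c :: l).length 0) (k : Int) v
          = (pre ++ [v]) ++ List.replicate l.length 0 := by
        intro pre v hp
        rw [PySem.List.pySetD_natCast]
        simp [List.set_append, hp, List.replicate_succ]
      set s0' := if c = '0' then s0 + 1 else s0 with hs0'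
      set s1' := if c = '0' then s1 else s1 + 1 with hs1'
      have hstep : stepA (pre0 ++ List.replicate (c :: l).length 0,
          pre1 ++ List.replicate (c :: l).length 0, s0, s1) ((k : Int), c)
          = ((pre0 ++ [s0']) ++ List.replicate l.length 0,
             (pre1 ++ [s1']) ++ List.replicate l.length 0, s0', s1') := by
        simp only [stepA, hget pre0 h0, hget pre1 h1, zero_add, ← hs0', ← hs1',
          hset pre0 s0' h0, hset pre1 s1' h1]
      rw [hstep]
      have hcast : ((k : Int) + 1) = ((k + 1 : Nat) : Int) := by push_cast; ring
      rw [hcast, ih (k+1) (pre0 ++ [s0']) (pre1 ++ [s1']) s0' s1' (by simp [h0]) (by simp [h1])]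
      simp only [List.length_cons, List.range_succ_eq_map, List.map_cons, List.map_map,
        List.append_assoc, List.cons_append]
      have hz1 : zCnt (List.take 1 (c :: l)) = if c = '0' then 1 else 0 := by
        simp [zCnt_cons, zCnt_nil]
      have ho1 : oCnt (List.take 1 (c :: l)) = if c = '0' then 0 else 1 := by
        simp [oCnt_cons, oCnt_nil]
      simp only [Prod.mk.injEq]
      refine ⟨?_, ?_, ?_, ?_⟩
      · congr 1
        refine List.cons_eq_cons.mpr ⟨by rw [hz1, hs0']; split_ifs <;> ring, ?_⟩
        apply List.map_congr_left
        intro j _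
        simp only [Function.comp_def, List.take_succ_cons, zCnt_cons, hs0']
        split_ifs <;> ring
      · congr 1
        refine List.cons_eq_cons.mpr ⟨by rw [ho1, hs1']; split_ifs <;> ring, ?_⟩
        apply List.map_congr_left
        intro j _
        simp only [Function.comp_def, List.take_succ_cons, oCnt_cons, hs1']
        split_ifs <;> ring
      · rw [zCnt_cons, hs0']; split_ifs <;> ring
      · rw [oCnt_cons, hs1']; split_ifs <;> ring

def mstep (x a : Int) : Int := if x > a then x else a

-- the split score after consuming j+1 characters of l, with initial counters z/o and T total ones
def scoreAt (T z o : Int) (l : List Char) (j : Nat) : Int :=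
  (z + zCnt (l.take (j+1))) + (T - (o + oCnt (l.take (j+1))))

-- B's second loop computes the running maximum of the split scores
theorem loopB (l : List Char) (T z o b : Int) :
    (l.foldl (stepB T) (z, o, b)).2.2
    = (List.range l.length).foldl (fun a j => mstep (scoreAt T z o l j) a) b := by
  induction l generalizing z o b with
  | nil => simp
  | cons c l ih =>
      simp only [List.foldl_cons, List.length_cons, List.range_succ_eq_map]
      set z' := if c = '0' then z + 1 else z with hz'
      set o' := if c = '0' then o else o + 1 with ho'
      have hsc0 : scoreAt T z o (c :: l) 0 = z' + (T - o') := by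
        simp only [scoreAt, List.take_succ_cons, List.take_zero, zCnt_cons, oCnt_cons,
          zCnt_nil, oCnt_nil, hz', ho']
        split_ifs <;> ring
      have hstep : stepB T (z, o, b) c = (z', o', mstep (z' + (T - o')) b) := by
        simp only [stepB, mstep, ← hz', ← ho']
      rw [hstep, ih z' o' _, hsc0, List.foldl_map]
      apply PySem.List.foldl_congr_mem
      intro a j _
      have h : scoreAt T z o (c :: l) (Nat.succ j) = scoreAt T z' o' l j := by
        simp only [scoreAt, List.take_succ_cons, zCnt_cons, oCnt_cons, hz', ho']
        split_ifs <;> ring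
      rw [h]

theorem mainEq (s : String) : maxScore s = maxScore_alt s := by
  simp only [maxScore, maxScore_alt]
  set cs := s.toList with hcs
  have hT : cs.foldl (fun acc c => if c ≠ '0' then acc + 1 else acc) 0 = oCnt cs := by
    rw [PySem.List.foldl_ite_add_one]
    simp [oCnt]
  rw [PySem.List.slice_to_neg_one, hT, loopB]
  have hA := loopA1 cs 0 [] [] 0 0 rfl rfl
  simp only [Nat.cast_zero, List.nil_append] at hA
  rw [hA]
  by_cases hnil : cs = []
  · rw [hnil]; simp [PySem.List.pyRange_one_eq_nil]
  · have hn : 1 ≤ cs.length := List.length_pos_iff.mpr hnil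
    simp only []
    rw [PySem.List.pyRange_one]
    have ht : (((cs.length : Int)) - 1).toNat = cs.length - 1 := by omega
    rw [ht, List.foldl_map, List.length_dropLast]
    apply PySem.List.foldl_congr_mem
    intro a k hk
    have hklt : k < cs.length - 1 := List.mem_range.mp hk
    have h1k : (1 : Int) + (k : Int) - 1 = ((k : Nat) : Int) := by push_cast; ring
    rw [h1k]
    have hp1ne : (List.range cs.length).map (fun j => 0 + oCnt (cs.take (j+1))) ≠ [] := by
      simp; omega
    rw [PySem.List.pyGetD_neg_one _ _ hp1ne]
    have hlast : ((List.range cs.length).map (fun j => 0 + oCnt (cs.take (j+1)))).getLast hp1ne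
        = oCnt cs := by
      rw [List.getLast_eq_getElem]
      simp only [List.length_map, List.length_range, List.getElem_map, List.getElem_range]
      rw [show cs.length - 1 + 1 = cs.length by omega, List.take_length]
      ring
    rw [hlast]
    rw [PySem.List.pyGetD_natCast, PySem.List.pyGetD_natCast]
    have hkn : k < cs.length := by omega
    have hget : ∀ (f : Nat → Int), ((List.range cs.length).map f).getD k 0 = f k := by
      intro f
      rw [List.getD_eq_getElem?_getD, List.getElem?_map, List.getElem?_range hkn]
      rfl
    rw [hget, hget]
    have htake : cs.dropLast.take (k+1) = cs.take (k+1) := by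
      rw [List.dropLast_eq_take, List.take_take, min_eq_left (by omega)]
    simp only [scoreAt, mstep, htake, zero_add]
    rw [max_def]
    split_ifs <;> omega

-- ===== VERDICT (by name: the statement is the Claim_ definition above) =====
theorem maxScore_spec : Claim_equal_maxScore := by
  intro s _
  show maxScore s = maxScore_alt s
  exact mainEq s
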